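-- pv_equiv track=rewrite | github.com/zitadel/passwap | internal/testvalues/passlib_drupal7.py | encode_crypt3
-- ===== SOURCE A (Python) =====
-- def encode_crypt3(raw_bytes):
--     """Python implementation of crypt3 encoding matching Go implementation"""
--     alphabet = "./0123456789ABCDEFGHIJKLMNOPQRSTUVWXYZabcdefghijklmnopqrstuvwxyz"
--     dest = []
--
--     v = 0
--     bits = 0
--
--     for b in raw_bytes:
--         v |= (b << bits)
--         bits += 8
--
--         while bits > 6:
--             dest.append(alphabet[v & 63])
--             v >>= 6
--             bits -= 6
--
--     if bits > 0:
--         dest.append(alphabet[v & 63])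
--
--     return ''.join(dest)
-- ===== SOURCE B (Python) =====
-- def encode_crypt3(raw_bytes):
--     """Little-endian crypt3/base64 encoding, 24 bits (3 input ints) per step with a carry."""
--     alphabet = "./0123456789ABCDEFGHIJKLMNOPQRSTUVWXYZabcdefghijklmnopqrstuvwxyz"
--     out = []
--     v = 0
--     i = 0
--     n = len(raw_bytes)
--     while i + 3 <= n:
--         w = v | raw_bytes[i] | raw_bytes[i + 1] << 8 | raw_bytes[i + 2] << 16
--         out.append(alphabet[w & 63])
--         out.append(alphabet[w >> 6 & 63])
--         out.append(alphabet[w >> 12 & 63])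
--         out.append(alphabet[w >> 18 & 63])
--         v = w >> 24
--         i += 3
--     rem = n - i
--     if rem == 1:
--         w = v | raw_bytes[i]
--         out.append(alphabet[w & 63])
--         out.append(alphabet[w >> 6 & 63])
--     elif rem == 2:
--         w = v | raw_bytes[i] | raw_bytes[i + 1] << 8
--         out.append(alphabet[w & 63])
--         out.append(alphabet[w >> 6 & 63])
--         out.append(alphabet[w >> 12 & 63])
--     return ''.join(out)
-- ===== Notes on version B (the rewrite author's own statement) =====
-- stated objective: alternative
-- what changed: Replaces A's per-byte state machine (v, bits counter, inner while-loop) with a step-3 loop that consumes 24 bits (3 ints) per iteration, emitting 4 output chars from one word w and keeping only a single carry v = w >> 24; the remainder of 1 or 2 ints is handled by two explicit tail cases, so the bits counter and the nested while-loop disappear.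
import Mathlib
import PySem

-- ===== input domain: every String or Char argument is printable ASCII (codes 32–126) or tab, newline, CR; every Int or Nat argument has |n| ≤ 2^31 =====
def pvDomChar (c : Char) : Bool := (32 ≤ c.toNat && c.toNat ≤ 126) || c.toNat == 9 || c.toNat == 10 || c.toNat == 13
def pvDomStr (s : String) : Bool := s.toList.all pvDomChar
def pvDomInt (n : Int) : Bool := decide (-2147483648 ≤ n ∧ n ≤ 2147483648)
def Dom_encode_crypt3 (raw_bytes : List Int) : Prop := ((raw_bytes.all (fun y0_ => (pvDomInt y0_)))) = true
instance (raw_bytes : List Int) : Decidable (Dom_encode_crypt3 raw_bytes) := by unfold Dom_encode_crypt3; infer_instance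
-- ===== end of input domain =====

-- B processes 24-bit blocks (3 ints → 4 chars) with a single carry instead of A's per-byte
-- bit-counter state machine; same O(n) cost, chosen as an alternative decomposition.

-- ===== PORT A =====
-- shared constant: the Python alphabet string, indexed as in `alphabet[i]` (index always in 0..63 here)
def pyAlphabet : String := "./0123456789ABCDEFGHIJKLMNOPQRSTUVWXYZabcdefghijklmnopqrstuvwxyz"
def alphaAt (i : Int) : Char := (PySem.Str.pyGet? pyAlphabet i).getD '!'

-- A's inner `while bits > 6` loop
def emitA (dest : List Char) (v : Int) (bits : Int) : List Char × Int × Int :=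
  if h : 6 < bits then
    emitA (dest ++ [alphaAt (PySem.Int.band v 63)]) (v >>> (6:Nat)) (bits - 6)
  else (dest, v, bits)
termination_by bits.toNat
decreasing_by omega

-- A's loop body: `v |= b << bits; bits += 8; while …`  (bits is always ≥ 0; `.toNat` is exact)
def stepA (st : List Char × Int × Int) (b : Int) : List Char × Int × Int :=
  emitA st.1 (PySem.Int.bor st.2.1 (b <<< st.2.2.toNat)) (st.2.2 + 8)

def encode_crypt3 (raw_bytes : List Int) : String :=
  let fin := raw_bytes.foldl stepA ([], 0, 0)
  let dest := if 0 < fin.2.2 then fin.1 ++ [alphaAt (PySem.Int.band fin.2.1 63)] else fin.1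
  String.mk dest

-- ===== PORT B =====
-- B's step-3 loop over the list: each full block of 3 ints yields 4 chars and a carry
def encB (v : Int) : List Int → List Char
  | b0 :: b1 :: b2 :: rest =>
    let w := PySem.Int.bor (PySem.Int.bor (PySem.Int.bor v b0) (b1 <<< (8:Nat))) (b2 <<< (16:Nat))
    alphaAt (PySem.Int.band w 63) :: alphaAt (PySem.Int.band (w >>> (6:Nat)) 63) ::
      alphaAt (PySem.Int.band (w >>> (12:Nat)) 63) :: alphaAt (PySem.Int.band (w >>> (18:Nat)) 63) ::
        encB (w >>> (24:Nat)) rest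
  | [b0] =>
    let w := PySem.Int.bor v b0
    [alphaAt (PySem.Int.band w 63), alphaAt (PySem.Int.band (w >>> (6:Nat)) 63)]
  | [b0, b1] =>
    let w := PySem.Int.bor (PySem.Int.bor v b0) (b1 <<< (8:Nat))
    [alphaAt (PySem.Int.band w 63), alphaAt (PySem.Int.band (w >>> (6:Nat)) 63),
      alphaAt (PySem.Int.band (w >>> (12:Nat)) 63)]
  | [] => []

def encode_crypt3_alt (raw_bytes : List Int) : String :=
  String.mk (encB 0 raw_bytes)

-- ===== PRECONDITION & SPEC =====
def Spec_encode_crypt3 (raw_bytes : List Int) (out : String) : Prop := out = encode_crypt3_alt raw_bytes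
instance (raw_bytes : List Int) (out : String) : Decidable (Spec_encode_crypt3 raw_bytes out) := by unfold Spec_encode_crypt3; infer_instance

-- ===== CLAIM (what is proved, stated in full; the proofs are below) =====
def Claim_equal_encode_crypt3 : Prop := ∀ (raw_bytes : List Int), Dom_encode_crypt3 raw_bytes → Spec_encode_crypt3 raw_bytes (encode_crypt3 raw_bytes)

-- ===== LEMMAS AND PROOFS =====

-- Nat-level bit facts
theorem pvZeroLdiff (a : Nat) : Nat.ldiff 0 a = 0 := by
  apply Nat.eq_of_testBit_eq; intro i; simp [Nat.testBit_ldiff]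

theorem pvLdiffAddAnd (n : Nat) : ∀ a : Nat, Nat.ldiff n a + (n &&& a) = n := by
  induction n using Nat.binaryRec with
  | zero => intro a; simp [pvZeroLdiff]
  | bit b n ih =>
    intro a
    have ha : Nat.bit (decide (a % 2 = 1)) (a / 2) = a := by
      rcases Nat.mod_two_eq_zero_or_one a with h | h <;> simp [Nat.bit_val, h] <;> omega
    rw [← ha, Nat.ldiff_bit, Nat.land_bit, Nat.bit_val, Nat.bit_val, Nat.bit_val]
    have := ih (a / 2)
    rcases b <;> rcases Nat.mod_two_eq_zero_or_one a with h | h <;> simp [h] at * <;> omega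

theorem pvSubAnd (n a : Nat) : n - (n &&& a) = Nat.ldiff n a := by
  have := pvLdiffAddAnd n a; omega

theorem pvPredShiftTestBit (a k i : Nat) :
    ((a + 1) <<< k - 1).testBit i = (decide (i < k) || a.testBit (i - k)) := by
  rcases Nat.lt_or_ge i k with h | h
  · have hk : 2 ^ k = 2 ^ (k - i - 1) * 2 * 2 ^ i := by
      rw [mul_assoc, ← pow_succ', ← pow_add]; congr 1; omega
    rw [Nat.shiftLeft_eq, Nat.testBit_eq_decide_div_mod_eq, hk]
    have hp : 0 < 2 ^ i := Nat.two_pow_pos i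
    have hq : 0 < 2 ^ (k - i - 1) := Nat.two_pow_pos _
    set c := (a + 1) * (2 ^ (k - i - 1) * 2) with hc
    have hcpos : 2 ≤ c := by
      have : 1 * (1 * 2) ≤ (a + 1) * (2 ^ (k - i - 1) * 2) := by
        apply Nat.mul_le_mul (by omega) (Nat.mul_le_mul hq (le_refl 2))
      omega
    have hdiv : ((a + 1) * (2 ^ (k - i - 1) * 2 * 2 ^ i) - 1) / 2 ^ i = c - 1 := by
      have hEq : (a + 1) * (2 ^ (k - i - 1) * 2 * 2 ^ i) - 1 = (2 ^ i - 1) + (c - 1) * 2 ^ i := by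
        rw [hc]; rw [← mul_assoc]; rw [Nat.sub_one_mul]
        have : 2 ^ i ≤ (a + 1) * (2 ^ (k - i - 1) * 2) * 2 ^ i := by
          calc 2 ^ i = 1 * 2 ^ i := by omega
          _ ≤ (a + 1) * (2 ^ (k - i - 1) * 2) * 2 ^ i := by
              apply Nat.mul_le_mul_right; omega
        omega
      rw [hEq, Nat.add_mul_div_right _ _ hp, Nat.div_eq_of_lt (by omega)]; omega
    rw [hdiv]
    have : (c - 1) % 2 = 1 := by
      have h2 : c % 2 = 0 := by
        rw [hc, ← mul_assoc]; exact Nat.mul_mod_left _ 2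
      omega
    simp [this, h]
  · have hdiv1 : ((a + 1) <<< k - 1) / 2 ^ k = a := by
      rw [Nat.shiftLeft_eq]
      have hp : 0 < 2 ^ k := Nat.two_pow_pos k
      have hEq : (a + 1) * 2 ^ k - 1 = (2 ^ k - 1) + a * 2 ^ k := by
        have : 2 ^ k ≤ (a + 1) * 2 ^ k := by
          calc 2 ^ k = 1 * 2 ^ k := by omega
          _ ≤ (a + 1) * 2 ^ k := by apply Nat.mul_le_mul_right; omega
        rw [Nat.add_mul] at this ⊢; omega
      rw [hEq, Nat.add_mul_div_right _ _ hp, Nat.div_eq_of_lt (by omega)]; omega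
    have hsplit : 2 ^ i = 2 ^ k * 2 ^ (i - k) := by rw [← pow_add]; congr 1; omega
    rw [Nat.testBit_eq_decide_div_mod_eq, hsplit, ← Nat.div_div_eq_div_mul, hdiv1]
    have : ¬ i < k := by omega
    simp [this, Nat.testBit_eq_decide_div_mod_eq]

-- Int.testBit characterisations of the PySem / core bit operations
theorem pvTbBor (x y : Int) (i : Nat) :
    (PySem.Int.bor x y).testBit i = (x.testBit i || y.testBit i) := by
  rcases x with a | a <;> rcases y with b | b <;>
    simp only [PySem.Int.bor, Int.testBit] <;>
    simp only [show ∀ m : Nat, (0 : Int) ≤ Int.ofNat m from fun m => Int.ofNat_nonneg m,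
      show ∀ m : Nat, ¬ (0 : Int) ≤ Int.negSucc m from fun m => by
        first | (simp [Int.negSucc_eq]; omega) | simp [Int.negSucc_eq] | omega, if_true, if_false]
  · -- ofNat / ofNat
    simp [Int.ofNat_eq_natCast, Int.toNat_natCast, Int.testBit, Nat.testBit_or]
  · -- ofNat / negSucc
    have h1 : (-Int.negSucc b - 1).toNat = b := by first | (simp [Int.negSucc_eq]; omega) | simp [Int.negSucc_eq] | omega
    have h2 : (Int.ofNat a).toNat = a := rfl
    rw [h1, h2]
    have h3 : (-(↑(b - (b &&& a)) : Int) - 1) = Int.negSucc (b - (b &&& a)) := by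
      simp [Int.negSucc_eq]; omega
    rw [h3]
    simp only [Int.testBit, pvSubAnd, Nat.testBit_ldiff]
    all_goals (rcases Nat.testBit a i <;> rcases Nat.testBit b i <;> rfl)
  · -- negSucc / ofNat
    have h1 : (-Int.negSucc a - 1).toNat = a := by first | (simp [Int.negSucc_eq]; omega) | simp [Int.negSucc_eq] | omega
    have h2 : (Int.ofNat b).toNat = b := rfl
    rw [h1, h2]
    have h3 : (-(↑(a - (a &&& b)) : Int) - 1) = Int.negSucc (a - (a &&& b)) := by
      simp [Int.negSucc_eq]; omega
    rw [h3]
    simp only [Int.testBit, pvSubAnd, Nat.testBit_ldiff]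
    all_goals (rcases Nat.testBit a i <;> rcases Nat.testBit b i <;> rfl)
  · -- negSucc / negSucc
    have h1 : (-Int.negSucc a - 1).toNat = a := by first | (simp [Int.negSucc_eq]; omega) | simp [Int.negSucc_eq] | omega
    have h2 : (-Int.negSucc b - 1).toNat = b := by first | (simp [Int.negSucc_eq]; omega) | simp [Int.negSucc_eq] | omega
    rw [h1, h2]
    have h3 : (-(↑(a &&& b) : Int) - 1) = Int.negSucc (a &&& b) := by
      simp [Int.negSucc_eq]; omega
    rw [h3]
    simp [Int.testBit, Nat.testBit_and]

theorem pvTbBand (x y : Int) (i : Nat) :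
    (PySem.Int.band x y).testBit i = (x.testBit i && y.testBit i) := by
  rcases x with a | a <;> rcases y with b | b <;>
    simp only [PySem.Int.band, Int.testBit] <;>
    simp only [show ∀ m : Nat, (0 : Int) ≤ Int.ofNat m from fun m => Int.ofNat_nonneg m,
      show ∀ m : Nat, ¬ (0 : Int) ≤ Int.negSucc m from fun m => by
        first | (simp [Int.negSucc_eq]; omega) | simp [Int.negSucc_eq] | omega, if_true, if_false]
  · simp [Int.ofNat_eq_natCast, Int.toNat_natCast, Int.testBit, Nat.testBit_and]
  · have h1 : (-Int.negSucc b - 1).toNat = b := by first | (simp [Int.negSucc_eq]; omega) | simp [Int.negSucc_eq] | omega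
    have h2 : (Int.ofNat a).toNat = a := rfl
    rw [h1, h2]
    simp only [Int.testBit, pvSubAnd, Nat.testBit_ldiff]
    all_goals (rcases Nat.testBit a i <;> rcases Nat.testBit b i <;> rfl)
  · have h1 : (-Int.negSucc a - 1).toNat = a := by first | (simp [Int.negSucc_eq]; omega) | simp [Int.negSucc_eq] | omega
    have h2 : (Int.ofNat b).toNat = b := rfl
    rw [h1, h2]
    simp only [Int.testBit, pvSubAnd, Nat.testBit_ldiff]
    all_goals (rcases Nat.testBit a i <;> rcases Nat.testBit b i <;> rfl)
  · have h1 : (-Int.negSucc a - 1).toNat = a := by first | (simp [Int.negSucc_eq]; omega) | simp [Int.negSucc_eq] | omega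
    have h2 : (-Int.negSucc b - 1).toNat = b := by first | (simp [Int.negSucc_eq]; omega) | simp [Int.negSucc_eq] | omega
    rw [h1, h2]
    have h3 : (-(↑(a ||| b) : Int) - 1) = Int.negSucc (a ||| b) := by
      simp [Int.negSucc_eq]; omega
    rw [h3]
    simp [Int.testBit, Nat.testBit_or]

theorem pvTbShr (x : Int) (k i : Nat) : (x >>> k).testBit i = x.testBit (k + i) := by
  rcases x with a | a
  · show (Int.ofNat (a >>> k)).testBit i = _
    simp [Int.testBit, Nat.testBit_shiftRight]
  · show (Int.negSucc (a >>> k)).testBit i = _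
    simp [Int.testBit, Nat.testBit_shiftRight]

theorem pvTbShl (x : Int) (k i : Nat) :
    (x <<< k).testBit i = (decide (k ≤ i) && x.testBit (i - k)) := by
  rcases x with a | a
  · show (Int.ofNat (a <<< k)).testBit i = _
    simp [Int.testBit, Nat.testBit_shiftLeft, ge_iff_le]
  · show (Int.negSucc ((a + 1) <<< k - 1)).testBit i = _
    simp only [Int.testBit, pvPredShiftTestBit]
    rcases Nat.lt_or_ge i k with h | h
    · simp [h, Nat.lt_iff_add_one_le] at * <;> simp [show ¬ k ≤ i by omega]
    · simp [show ¬ i < k by omega, h]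

theorem pvIntExt (x y : Int) (h : ∀ i : Nat, x.testBit i = y.testBit i) : x = y := by
  rcases x with a | a <;> rcases y with b | b
  · congr 1
    apply Nat.eq_of_testBit_eq; intro i; exact h i
  · exfalso
    have hi := h (a + b)
    have ha : a.testBit (a + b) = false :=
      Nat.testBit_eq_false_of_lt (lt_of_lt_of_le (Nat.lt_two_pow_self)
        (Nat.pow_le_pow_right (by norm_num) (by omega)))
    have hb : b.testBit (a + b) = false :=
      Nat.testBit_eq_false_of_lt (lt_of_lt_of_le (Nat.lt_two_pow_self)
        (Nat.pow_le_pow_right (by norm_num) (by omega)))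
    simp [Int.testBit, ha, hb] at hi
  · exfalso
    have hi := h (a + b)
    have ha : a.testBit (a + b) = false :=
      Nat.testBit_eq_false_of_lt (lt_of_lt_of_le (Nat.lt_two_pow_self)
        (Nat.pow_le_pow_right (by norm_num) (by omega)))
    have hb : b.testBit (a + b) = false :=
      Nat.testBit_eq_false_of_lt (lt_of_lt_of_le (Nat.lt_two_pow_self)
        (Nat.pow_le_pow_right (by norm_num) (by omega)))
    simp [Int.testBit, ha, hb] at hi
  · congr 1
    apply Nat.eq_of_testBit_eq; intro i
    have := h i
    simpa [Int.testBit] using this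

-- derived Int identities
theorem pvBorShr (x y : Int) (k : Nat) :
    (PySem.Int.bor x y) >>> k = PySem.Int.bor (x >>> k) (y >>> k) := by
  apply pvIntExt; intro i
  rw [pvTbShr, pvTbBor, pvTbBor, pvTbShr, pvTbShr]

theorem pvShlZero (x : Int) : x <<< (0 : Nat) = x := by
  apply pvIntExt; intro i
  rw [pvTbShl]; simp

theorem pvShlShrLe (b : Int) (m k : Nat) (h : k ≤ m) : (b <<< m) >>> k = b <<< (m - k) := by
  apply pvIntExt; intro i
  rw [pvTbShr, pvTbShl, pvTbShl]
  rcases Nat.lt_or_ge i (m - k) with h1 | h1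
  · simp [show ¬ m ≤ k + i by omega, show ¬ m - k ≤ i by omega]
  · simp [show m ≤ k + i by omega, show m - k ≤ i by omega, show k + i - m = i - (m - k) by omega]

theorem pvShlShrGe (b : Int) (m k : Nat) (h : m ≤ k) : (b <<< m) >>> k = b >>> (k - m) := by
  apply pvIntExt; intro i
  rw [pvTbShr, pvTbShl, pvTbShr]
  simp [show m ≤ k + i by omega, show k + i - m = k - m + i by omega]

theorem pvShrShr (x : Int) (m k : Nat) : (x >>> m) >>> k = x >>> (m + k) := by
  rw [Int.shiftRight_add]

theorem pvTb63 (i : Nat) : (63 : Int).testBit i = decide (i < 6) := by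
  have h : (63 : Int) = Int.ofNat 63 := rfl
  rw [h]
  show Nat.testBit 63 i = decide (i < 6)
  have h2 : (63 : Nat) = 2 ^ 6 - 1 := by norm_num
  rw [h2, Nat.testBit_two_pow_sub_one]

theorem pvBand63Kill (x b : Int) (k : Nat) (h : 6 ≤ k) :
    PySem.Int.band (PySem.Int.bor x (b <<< k)) 63 = PySem.Int.band x 63 := by
  apply pvIntExt; intro i
  rw [pvTbBand, pvTbBand, pvTbBor, pvTbShl, pvTb63]
  rcases Nat.lt_or_ge i 6 with h1 | h1
  · simp [h1, show ¬ k ≤ i by omega]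
  · simp [show ¬ i < 6 by omega]

theorem pvBorZeroLeft (x : Int) : PySem.Int.bor 0 x = x := by
  rw [PySem.Int.bor_comm, PySem.Int.bor_zero]

-- evaluation of A's inner while-loop at the concrete bit counts that occur
theorem pvEmit8 (d : List Char) (v : Int) :
    emitA d v 8 = (d ++ [alphaAt (PySem.Int.band v 63)], v >>> (6:Nat), 2) := by
  rw [emitA]; norm_num; rw [emitA]; norm_num

theorem pvEmit10 (d : List Char) (v : Int) :
    emitA d v 10 = (d ++ [alphaAt (PySem.Int.band v 63)], v >>> (6:Nat), 4) := by
  rw [emitA]; norm_num; rw [emitA]; norm_num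

theorem pvEmit12 (d : List Char) (v : Int) :
    emitA d v 12 = (d ++ [alphaAt (PySem.Int.band v 63)], v >>> (6:Nat), 6) := by
  rw [emitA]; norm_num; rw [emitA]; norm_num

theorem pvEmit14 (d : List Char) (v : Int) :
    emitA d v 14 = (d ++ [alphaAt (PySem.Int.band v 63), alphaAt (PySem.Int.band (v >>> (6:Nat)) 63)],
      (v >>> (6:Nat)) >>> (6:Nat), 2) := by
  rw [emitA]; norm_num; rw [emitA]; norm_num; rw [emitA]; norm_num

-- A's trailing emission
def tailA (st : List Char × Int × Int) : List Char :=
  if 0 < st.2.2 then st.1 ++ [alphaAt (PySem.Int.band st.2.1 63)] else st.1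

-- the main loop invariant: from a mid-stream state (v, bits = 6), A's remaining output equals
-- the pending char of v plus B's block encoding with carry v >>> 6

-- literal shift-through-shift instances used below
theorem pvS6_6 (b : Int) : (b <<< (6:Nat)) >>> (6:Nat) = b := by
  rw [pvShlShrLe b 6 6 (by norm_num)]; exact pvShlZero b
theorem pvS2_6 (b : Int) : (b <<< (2:Nat)) >>> (6:Nat) = b >>> (4:Nat) := by
  rw [pvShlShrGe b 2 6 (by norm_num)]
theorem pvS4_6 (b : Int) : (b <<< (4:Nat)) >>> (6:Nat) = b >>> (2:Nat) := by
  rw [pvShlShrGe b 4 6 (by norm_num)]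
theorem pvR6_6 (v : Int) : (v >>> (6:Nat)) >>> (6:Nat) = v >>> (12:Nat) := by
  rw [pvShrShr]
theorem pvKill8 (x b : Int) : PySem.Int.band (PySem.Int.bor x (b <<< (8:Nat))) 63 = PySem.Int.band x 63 :=
  pvBand63Kill x b 8 (by norm_num)
theorem pvKill16 (x b : Int) : PySem.Int.band (PySem.Int.bor x (b <<< (16:Nat))) 63 = PySem.Int.band x 63 :=
  pvBand63Kill x b 16 (by norm_num)
theorem pvKill10 (x b : Int) : PySem.Int.band (PySem.Int.bor x (b <<< (10:Nat))) 63 = PySem.Int.band x 63 :=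
  pvBand63Kill x b 10 (by norm_num)
theorem pvKill6 (x b : Int) : PySem.Int.band (PySem.Int.bor x (b <<< (6:Nat))) 63 = PySem.Int.band x 63 :=
  pvBand63Kill x b 6 (by norm_num)

-- one A-step from a state with bits = 6 (two inner emissions)
theorem pvStep6 (d : List Char) (v b : Int) :
    stepA (d, v, 6) b = (d ++ [alphaAt (PySem.Int.band v 63),
      alphaAt (PySem.Int.band (PySem.Int.bor (v >>> (6:Nat)) b) 63)],
      PySem.Int.bor (v >>> (12:Nat)) (b >>> (6:Nat)), 2) := by
  show emitA d (PySem.Int.bor v (b <<< ((6:Int)).toNat)) (6 + 8) = _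
  have h1 : (6:Int).toNat = 6 := rfl
  have h2 : (6:Int) + 8 = 14 := by norm_num
  rw [h1, h2, pvEmit14]
  rw [pvKill6, pvBorShr, pvS6_6, pvBorShr, pvR6_6]

-- one A-step from a state with bits = 2 (one inner emission)
theorem pvStep2 (d : List Char) (v b : Int) :
    stepA (d, v, 2) b = (d ++ [alphaAt (PySem.Int.band (PySem.Int.bor v (b <<< (2:Nat))) 63)],
      PySem.Int.bor (v >>> (6:Nat)) (b >>> (4:Nat)), 4) := by
  show emitA d (PySem.Int.bor v (b <<< ((2:Int)).toNat)) (2 + 8) = _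
  have h1 : (2:Int).toNat = 2 := rfl
  have h2 : (2:Int) + 8 = 10 := by norm_num
  rw [h1, h2, pvEmit10, pvBorShr, pvS2_6]

-- one A-step from a state with bits = 4 (one inner emission)
theorem pvStep4 (d : List Char) (v b : Int) :
    stepA (d, v, 4) b = (d ++ [alphaAt (PySem.Int.band (PySem.Int.bor v (b <<< (4:Nat))) 63)],
      PySem.Int.bor (v >>> (6:Nat)) (b >>> (2:Nat)), 6) := by
  show emitA d (PySem.Int.bor v (b <<< ((4:Int)).toNat)) (4 + 8) = _
  have h1 : (4:Int).toNat = 4 := rfl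
  have h2 : (4:Int) + 8 = 12 := by norm_num
  rw [h1, h2, pvEmit12, pvBorShr, pvS4_6]

-- one A-step from a state with bits = 0 (one inner emission)
theorem pvStep0 (d : List Char) (v b : Int) :
    stepA (d, v, 0) b = (d ++ [alphaAt (PySem.Int.band (PySem.Int.bor v b) 63)],
      (PySem.Int.bor v b) >>> (6:Nat), 2) := by
  show emitA d (PySem.Int.bor v (b <<< ((0:Int)).toNat)) (0 + 8) = _
  have h1 : (0:Int).toNat = 0 := rfl
  have h2 : (0:Int) + 8 = 8 := by norm_num
  rw [h1, h2, pvShlZero, pvEmit8]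

theorem pvGo : ∀ (n : Nat) (l : List Int), l.length ≤ n → ∀ (v : Int) (d : List Char),
    tailA (List.foldl stepA (d, v, 6) l) =
      d ++ alphaAt (PySem.Int.band v 63) :: encB (v >>> (6:Nat)) l := by
  intro n
  induction n with
  | zero =>
    intro l hl v d
    have : l = [] := by cases l <;> simp at hl <;> rfl
    subst this
    simp [tailA, encB]
  | succ n ih =>
    intro l hl v d
    match l with
    | [] => simp [tailA, encB]
    | [b0] =>
      simp [List.foldl, pvStep6, tailA, encB, pvBorShr, pvShrShr, pvShlShrLe, pvShlShrGe,
        pvShlZero, pvKill6, pvKill8, pvKill10, pvKill16]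
    | [b0, b1] =>
      simp [List.foldl, pvStep6, pvStep2, tailA, encB, pvBorShr, pvShrShr, pvShlShrLe, pvShlShrGe,
        pvShlZero, pvKill6, pvKill8, pvKill10, pvKill16]
    | b0 :: b1 :: b2 :: rest =>
      have hrest : rest.length ≤ n := by simp at hl; omega
      simp only [List.foldl, pvStep6, pvStep2, pvStep4]
      rw [ih rest hrest]
      simp [encB, pvBorShr, pvShrShr, pvShlShrLe, pvShlShrGe,
        pvShlZero, pvKill6, pvKill8, pvKill10, pvKill16]

theorem encode_crypt3_spec : Claim_equal_encode_crypt3 := by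
  intro l _
  show encode_crypt3 l = encode_crypt3_alt l
  have hE : encode_crypt3 l = String.mk (tailA (l.foldl stepA ([], 0, 0))) := rfl
  rw [hE]
  show String.mk _ = String.mk (encB 0 l)
  congr 1
  match l with
  | [] => rfl
  | [b0] =>
    simp [List.foldl, pvStep0, tailA, encB, pvBorZeroLeft, pvBorShr, pvShrShr,
      pvShlShrLe, pvShlShrGe, pvShlZero, pvKill6, pvKill8, pvKill10, pvKill16]
  | [b0, b1] =>
    simp [List.foldl, pvStep0, pvStep2, tailA, encB, pvBorZeroLeft, pvBorShr, pvShrShr,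
      pvShlShrLe, pvShlShrGe, pvShlZero, pvKill6, pvKill8, pvKill10, pvKill16]
  | b0 :: b1 :: b2 :: rest =>
    simp only [List.foldl, pvStep0, pvStep2, pvStep4, pvBorZeroLeft]
    rw [pvGo rest.length rest (le_refl _)]
    simp [encB, pvBorZeroLeft, pvBorShr, pvShrShr, pvShlShrLe, pvShlShrGe,
      pvShlZero, pvKill6, pvKill8, pvKill10, pvKill16]
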